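-- pv_equiv track=rewrite | github.com/apostolovbg/webcam-micro | devcovenant/builtin/policies/no_raw_errors/no_raw_errors.py | _waiver_regions
-- ===== SOURCE A (Python) =====
-- from typing import List, Sequence
--
-- def _waiver_regions(
--     lines: Sequence[str],
--     between_pairs: Sequence[tuple[str, str]],
-- ) -> list[tuple[int, int]]:
--     """Return inclusive line ranges where broad-handler waivers are active."""
--     regions: list[tuple[int, int]] = []
--     for left, right in between_pairs:
--         start_line = 0
--         for line_number, line_content in enumerate(lines, start=1):
--             if not start_line and left in line_content:
--                 start_line = line_number
--             if start_line and right in line_content: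
--                 regions.append((start_line, line_number))
--                 start_line = 0
--     return regions
-- ===== SOURCE B (Python) =====
-- from typing import List, Sequence
--
-- def _waiver_regions(
--     lines: Sequence[str],
--     between_pairs: Sequence[tuple[str, str]],
-- ) -> list[tuple[int, int]]:
--     """Return inclusive line ranges where broad-handler waivers are active."""
--     regions: list[tuple[int, int]] = []
--     for left, right in between_pairs:
--         lpos = [i for i, s in enumerate(lines, 1) if left in s]
--         rpos = [i for i, s in enumerate(lines, 1) if right in s]
--         prev = 0
--         j = 0
--         for p in lpos:
--             if p <= prev:
--                 continue
--             while j < len(rpos) and rpos[j] < p: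
--                 j += 1
--             if j == len(rpos):
--                 break
--             regions.append((p, rpos[j]))
--             prev = rpos[j]
--     return regions
-- ===== Notes on version B (the rewrite author's own statement) =====
-- stated objective: alternative
-- what changed: Replaces the per-line open/close flag state machine with a position-table approach: per pair, build the sorted lists of line numbers containing the left and right markers, then emit regions by a two-pointer merge of the two lists.
import Mathlib
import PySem

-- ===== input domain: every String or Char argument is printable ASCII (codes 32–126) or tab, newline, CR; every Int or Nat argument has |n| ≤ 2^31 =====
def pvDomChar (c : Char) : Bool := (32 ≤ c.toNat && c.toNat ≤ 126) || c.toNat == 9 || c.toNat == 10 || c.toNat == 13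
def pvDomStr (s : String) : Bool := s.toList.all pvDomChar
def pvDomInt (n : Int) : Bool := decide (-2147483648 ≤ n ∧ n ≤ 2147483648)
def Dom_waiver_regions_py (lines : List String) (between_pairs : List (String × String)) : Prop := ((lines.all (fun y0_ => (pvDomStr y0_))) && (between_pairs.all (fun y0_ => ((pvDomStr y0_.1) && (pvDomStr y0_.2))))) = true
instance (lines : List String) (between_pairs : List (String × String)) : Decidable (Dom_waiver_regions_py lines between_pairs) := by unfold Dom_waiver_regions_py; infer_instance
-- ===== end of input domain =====

-- B replaces A's single-flag line sweep by per-pair position tables (line numbers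
-- holding each marker) merged with a two-pointer walk; same cost, different shape.

-- ===== PORT A =====
-- literal port: outer loop over pairs, inner enumerate(lines, 1) sweep with
-- state (start_line, regions)
def waiver_regions_py (lines : List String) (between_pairs : List (String × String)) : List (Int × Int) :=
  between_pairs.foldl (fun regions lr =>
    ((PySem.List.enumerate lines 1).foldl
      (fun (st : Int × List (Int × Int)) nc =>
        let start1 := if st.1 == 0 && PySem.Str.isIn lr.1 nc.2 then nc.1 else st.1
        if start1 != 0 && PySem.Str.isIn lr.2 nc.2 then (0, st.2 ++ [(start1, nc.1)])
        else (start1, st.2))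
      (0, regions)).2) []

-- ===== PORT B =====
-- two-pointer merge of the two position lists (Source B keeps index j on the right
-- list; the unconsumed right suffix q :: rs' plays the role of j)
def mergeRegionsB : Int → List Int → List Int → List (Int × Int)
  | _, [], _ => []
  | prev, p :: ps, rs =>
    if p ≤ prev then mergeRegionsB prev ps rs
    else
      match rs.dropWhile (fun q => decide (q < p)) with
      | [] => []
      | q :: rs' => (p, q) :: mergeRegionsB q ps (q :: rs')

def waiver_regions_py_alt (lines : List String) (between_pairs : List (String × String)) : List (Int × Int) :=
  between_pairs.foldl (fun regions lr =>
    let lpos := ((PySem.List.enumerate lines 1).filter (fun nc => PySem.Str.isIn lr.1 nc.2)).map Prod.fst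
    let rpos := ((PySem.List.enumerate lines 1).filter (fun nc => PySem.Str.isIn lr.2 nc.2)).map Prod.fst
    regions ++ mergeRegionsB 0 lpos rpos) []

-- ===== PRECONDITION & SPEC =====
def Spec_waiver_regions_py (lines : List String) (between_pairs : List (String × String)) (out : List (Int × Int)) : Prop := out = waiver_regions_py_alt lines between_pairs
instance (lines : List String) (between_pairs : List (String × String)) (out : List (Int × Int)) : Decidable (Spec_waiver_regions_py lines between_pairs out) := by unfold Spec_waiver_regions_py; infer_instance

-- ===== CLAIM (what is proved, stated in full; the proofs are below) =====
def Claim_equal_waiver_regions_py : Prop := ∀ (lines : List String) (between_pairs : List (String × String)), Dom_waiver_regions_py lines between_pairs → Spec_waiver_regions_py lines between_pairs (waiver_regions_py lines between_pairs)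

-- ===== LEMMAS AND PROOFS =====

-- recursive form of A's inner sweep (regions emitted in order, no accumulator)
def sweepA (left right : String) : Int → List (Int × String) → List (Int × Int)
  | _, [] => []
  | start, nc :: rest =>
    let start1 := if start == 0 && PySem.Str.isIn left nc.2 then nc.1 else start
    if start1 != 0 && PySem.Str.isIn right nc.2 then (start1, nc.1) :: sweepA left right 0 rest
    else sweepA left right start1 rest

-- position table of a marker over numbered lines
def posOf (t : String) (numbered : List (Int × String)) : List Int :=
  (numbered.filter (fun nc => PySem.Str.isIn t nc.2)).map Prod.fst

lemma posOf_cons (t : String) (nc : Int × String) (rest : List (Int × String)) :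
    posOf t (nc :: rest) = if PySem.Str.isIn t nc.2 then nc.1 :: posOf t rest else posOf t rest := by
  simp only [posOf, List.filter_cons]
  split <;> simp

lemma mem_posOf (t : String) {p : Int} {numbered : List (Int × String)}
    (h : p ∈ posOf t numbered) : p ∈ numbered.map Prod.fst := by
  simp only [posOf, List.mem_map, List.mem_filter] at h ⊢
  obtain ⟨x, ⟨hx, _⟩, rfl⟩ := h
  exact ⟨x, hx, rfl⟩

-- A's inner fold against its recursive form
lemma foldA_eq_sweepA (left right : String) :
    ∀ (numbered : List (Int × String)) (start : Int) (acc : List (Int × Int)),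
    (numbered.foldl
      (fun (st : Int × List (Int × Int)) nc =>
        let start1 := if st.1 == 0 && PySem.Str.isIn left nc.2 then nc.1 else st.1
        if start1 != 0 && PySem.Str.isIn right nc.2 then (0, st.2 ++ [(start1, nc.1)])
        else (start1, st.2))
      (start, acc)).2 = acc ++ sweepA left right start numbered := by
  intro numbered
  induction numbered with
  | nil => intro start acc; simp [sweepA]
  | cons nc rest ih =>
    intro start acc
    simp only [List.foldl_cons, sweepA]
    split <;> split <;> rw [ih] <;> simp


lemma mergeB_cons_le {prev p : Int} (h : p ≤ prev) (ps rs : List Int) :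
    mergeRegionsB prev (p :: ps) rs = mergeRegionsB prev ps rs := by
  simp [mergeRegionsB, h]

lemma mergeB_cons_not_le {prev p : Int} (h : ¬ p ≤ prev) (ps rs : List Int) :
    mergeRegionsB prev (p :: ps) rs =
      match rs.dropWhile (fun q => decide (q < p)) with
      | [] => []
      | q :: rs' => (p, q) :: mergeRegionsB q ps (q :: rs') := by
  simp [mergeRegionsB, h]

lemma dropWhile_lt_eq_self {n : Int} {rs : List Int} (h : ∀ q ∈ rs, ¬ q < n) :
    rs.dropWhile (fun q => decide (q < n)) = rs := by
  cases rs with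
  | nil => rfl
  | cons q rs => simp [List.dropWhile_cons, h q List.mem_cons_self]

-- a right-list head that every relevant left position exceeds can be dropped
lemma mergeB_cons_r (q : Int) (rs : List Int) :
    ∀ (prev : Int) (ps : List Int), (∀ p ∈ ps, prev < p → q < p) →
    mergeRegionsB prev ps (q :: rs) = mergeRegionsB prev ps rs := by
  intro prev ps
  induction ps with
  | nil => intro _; rfl
  | cons p ps ih =>
    intro h
    by_cases hp : p ≤ prev
    · simp only [mergeRegionsB, if_pos hp]
      exact ih (fun x hx => h x (List.mem_cons_of_mem _ hx))
    · have hq : q < p := h p List.mem_cons_self (by omega)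
      simp only [mergeRegionsB, if_neg hp, List.dropWhile_cons, decide_eq_true_eq, if_pos hq]

-- the central equivalence: A's sweep = B's two-pointer merge, per pair
lemma sweep_eq_merge (left right : String) :
    ∀ (numbered : List (Int × String)),
    (numbered.map Prod.fst).Pairwise (· < ·) →
    (∀ x ∈ numbered, 0 < x.1) →
    ((∀ prev : Int, 0 ≤ prev → (∀ x ∈ numbered, prev < x.1) →
        sweepA left right 0 numbered = mergeRegionsB prev (posOf left numbered) (posOf right numbered))
     ∧ (∀ s : Int, s ≠ 0 →
        sweepA left right s numbered =
          match posOf right numbered with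
          | [] => []
          | q :: _ => (s, q) :: mergeRegionsB q (posOf left numbered) (posOf right numbered))) := by
  intro numbered
  induction numbered with
  | nil =>
    intro _ _
    constructor
    · intro prev _ _; simp [sweepA, posOf, mergeRegionsB]
    · intro s _; simp [sweepA, posOf]
  | cons nc rest ih =>
    intro hpw hpos
    obtain ⟨n, c⟩ := nc
    simp only [List.map_cons, List.pairwise_cons] at hpw
    obtain ⟨hlt, hpw'⟩ := hpw
    have hpos' : ∀ x ∈ rest, 0 < x.1 := fun x hx => hpos x (List.mem_cons_of_mem _ hx)
    have hn : 0 < n := hpos (n, c) List.mem_cons_self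
    have hn0 : (n != 0) = true := bne_iff_ne.mpr hn.ne'
    obtain ⟨IH1, IH2⟩ := ih hpw' hpos'
    have hltr : ∀ x ∈ rest, n < x.1 := fun x hx => hlt x.1 (List.mem_map_of_mem hx)
    have hLgt : ∀ p ∈ posOf left rest, n < p := fun p hp => hlt p (mem_posOf left hp)
    have hRgt : ∀ p ∈ posOf right rest, n < p := fun p hp => hlt p (mem_posOf right hp)
    by_cases hl : PySem.Str.isIn left c = true <;>
      by_cases hr : PySem.Str.isIn right c = true
    · -- left and right both on this line: region (n, n)
      constructor
      · intro prev hprev hgt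
        have hnp : ¬ n ≤ prev := by
          have := hgt (n, c) List.mem_cons_self; simp only at this; omega
        simp only [sweepA, posOf_cons, Bool.false_eq_true, reduceIte, hl, hr, if_true, beq_self_eq_true, Bool.true_and,
          Bool.and_true, hn0]
        rw [mergeB_cons_not_le hnp]
        have hdw : (n :: posOf right rest).dropWhile (fun q => decide (q < n))
            = n :: posOf right rest := by simp [List.dropWhile_cons]
        rw [hdw]
        show (n, n) :: sweepA left right 0 rest
          = (n, n) :: mergeRegionsB n (posOf left rest) (n :: posOf right rest)
        rw [mergeB_cons_r n _ n _ (fun p _ h => h)]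
        exact congrArg _ (IH1 n hn.le hltr)
      · intro s hs
        have hs0 : (s == 0) = false := by simp [hs]
        have hsne : (s != 0) = true := bne_iff_ne.mpr hs
        simp only [sweepA, posOf_cons, Bool.false_eq_true, reduceIte, hl, hr, if_true, hs0, Bool.false_and, if_false,
          Bool.and_true, hsne]
        rw [mergeB_cons_le le_rfl, mergeB_cons_r n _ n _ (fun p _ h => h)]
        exact congrArg _ (IH1 n hn.le hltr)
    · -- only left here: region opens at n
      have hr' : PySem.Str.isIn right c = false := by
        cases h : PySem.Str.isIn right c with
        | true => exact absurd h hr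
        | false => rfl
      constructor
      · intro prev hprev hgt
        have hnp : ¬ n ≤ prev := by
          have := hgt (n, c) List.mem_cons_self; simp only at this; omega
        simp only [sweepA, posOf_cons, Bool.false_eq_true, reduceIte, hl, hr', if_true, if_false, beq_self_eq_true,
          Bool.true_and, Bool.and_false]
        rw [mergeB_cons_not_le hnp]
        rw [dropWhile_lt_eq_self (fun q hq => by have := hRgt q hq; omega)]
        rw [IH2 n hn.ne']
        cases hR : posOf right rest with
        | nil => rfl
        | cons q rs' => rfl
      · intro s hs
        have hs0 : (s == 0) = false := by simp [hs]
        simp only [sweepA, posOf_cons, Bool.false_eq_true, reduceIte, hl, hr', if_true, hs0, Bool.false_and, if_false,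
          Bool.and_false]
        rw [IH2 s hs]
        cases hR : posOf right rest with
        | nil => rfl
        | cons q rs' =>
          have hq : n ≤ q := (hRgt q (by rw [hR]; exact List.mem_cons_self)).le
          show (s, q) :: mergeRegionsB q (posOf left rest) (q :: rs')
            = (s, q) :: mergeRegionsB q (n :: posOf left rest) (q :: rs')
          rw [mergeB_cons_le hq]
    · -- only right here
      have hl' : PySem.Str.isIn left c = false := by
        cases h : PySem.Str.isIn left c with
        | true => exact absurd h hl
        | false => rfl
      constructor
      · intro prev hprev hgt
        have hgt' : ∀ x ∈ rest, prev < x.1 := fun x hx => hgt x (List.mem_cons_of_mem _ hx)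
        simp only [sweepA, posOf_cons, Bool.false_eq_true, reduceIte, hl', hr, if_true, if_false, Bool.and_false,
          Bool.false_and, bne_self_eq_false]
        rw [mergeB_cons_r n _ prev _ (fun p hp _ => hLgt p hp)]
        exact IH1 prev hprev hgt'
      · intro s hs
        have hs0 : (s == 0) = false := by simp [hs]
        have hsne : (s != 0) = true := bne_iff_ne.mpr hs
        simp only [sweepA, posOf_cons, Bool.false_eq_true, reduceIte, hl', hr, if_true, hs0, Bool.false_and, if_false,
          Bool.and_true, hsne]
        rw [mergeB_cons_r n _ n _ (fun p _ h => h)]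
        exact congrArg _ (IH1 n hn.le hltr)
    · -- neither marker here
      have hl' : PySem.Str.isIn left c = false := by
        cases h : PySem.Str.isIn left c with
        | true => exact absurd h hl
        | false => rfl
      have hr' : PySem.Str.isIn right c = false := by
        cases h : PySem.Str.isIn right c with
        | true => exact absurd h hr
        | false => rfl
      constructor
      · intro prev hprev hgt
        have hgt' : ∀ x ∈ rest, prev < x.1 := fun x hx => hgt x (List.mem_cons_of_mem _ hx)
        simp only [sweepA, posOf_cons, Bool.false_eq_true, reduceIte, hl', hr', if_false, Bool.and_false, Bool.false_and,
          bne_self_eq_false]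
        exact IH1 prev hprev hgt'
      · intro s hs
        have hs0 : (s == 0) = false := by simp [hs]
        simp only [sweepA, posOf_cons, Bool.false_eq_true, reduceIte, hl', hr', if_false, hs0, Bool.false_and,
          Bool.and_false]
        exact IH2 s hs


theorem waiver_regions_py_spec : Claim_equal_waiver_regions_py := by
  intro lines bp _
  unfold Spec_waiver_regions_py waiver_regions_py waiver_regions_py_alt
  have hpw : ((PySem.List.enumerate lines 1).map Prod.fst).Pairwise (· < ·) := by
    rw [List.pairwise_map]; exact PySem.List.pairwise_lt_enumerate lines 1
  have hpos : ∀ x ∈ PySem.List.enumerate lines 1, (0 : Int) < x.1 := by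
    intro x hx
    rw [PySem.List.mem_enumerate_iff] at hx
    obtain ⟨k, hk, rfl⟩ := hx
    simp only
    omega
  suffices h : ∀ (bp : List (String × String)) (acc : List (Int × Int)),
      bp.foldl (fun regions lr =>
        ((PySem.List.enumerate lines 1).foldl
          (fun (st : Int × List (Int × Int)) nc =>
            let start1 := if st.1 == 0 && PySem.Str.isIn lr.1 nc.2 then nc.1 else st.1
            if start1 != 0 && PySem.Str.isIn lr.2 nc.2 then (0, st.2 ++ [(start1, nc.1)])
            else (start1, st.2))
          (0, regions)).2) acc
      = bp.foldl (fun regions lr =>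
          regions ++ mergeRegionsB 0 (posOf lr.1 (PySem.List.enumerate lines 1))
            (posOf lr.2 (PySem.List.enumerate lines 1))) acc by
    exact (h bp []).symm ▸ rfl
  intro bp
  induction bp with
  | nil => intro acc; rfl
  | cons lr bps ih =>
    intro acc
    simp only [List.foldl_cons]
    rw [foldA_eq_sweepA lr.1 lr.2 (PySem.List.enumerate lines 1) 0 acc]
    rw [(sweep_eq_merge lr.1 lr.2 (PySem.List.enumerate lines 1) hpw hpos).1 0 le_rfl hpos]
    exact ih _
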